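-- pv_equiv track=rewrite | github.com/thealper2/codewars-solutions | 7-kyu/dropcaps.py | drop_cap
-- ===== SOURCE A (Python) =====
-- def drop_cap(words):
--     result = ""
--     word = ""
--     for c in words:
--         if c.isalpha():
--             word += c
--         else:
--             if word:
--                 if len(word) > 2:
--                     result += word.capitalize()
--                 else:
--                     result += word
--
--                 word = ""
--
--             result += c
--
--     if word:
--         if len(word) > 2:
--             result += word.capitalize()
--         else:
--             result += word
--
--         word = ""
--
--     return result
-- ===== SOURCE B (Python) =====
-- def drop_cap(words):
--     out = []
--     i, n = 0, len(words)
--     while i < n: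
--         k = words[i].isalpha()
--         j = i + 1
--         while j < n and words[j].isalpha() == k:
--             j += 1
--         chunk = words[i:j]
--         out.append(chunk.capitalize() if k and j - i > 2 else chunk)
--         i = j
--     return "".join(out)
-- ===== Notes on version B (the rewrite author's own statement) =====
-- stated objective: idiomatic
-- what changed: Replaces the per-character accumulator with end-of-run flushes by a two-pointer scan that extracts maximal same-predicate runs (groupby-style), transforms each alphabetic run longer than two with capitalize(), and joins the chunks.
import Mathlib
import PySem

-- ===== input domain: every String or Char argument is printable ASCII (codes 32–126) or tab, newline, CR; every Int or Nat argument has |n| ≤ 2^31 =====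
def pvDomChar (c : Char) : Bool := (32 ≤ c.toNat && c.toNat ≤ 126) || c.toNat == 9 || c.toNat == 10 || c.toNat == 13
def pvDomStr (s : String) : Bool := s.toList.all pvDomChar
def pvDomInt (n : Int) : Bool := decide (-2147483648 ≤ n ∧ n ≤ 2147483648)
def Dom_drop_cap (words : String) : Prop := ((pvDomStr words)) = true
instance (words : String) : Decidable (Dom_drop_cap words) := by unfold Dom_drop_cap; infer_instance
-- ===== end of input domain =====

-- B replaces A's per-character word accumulator with a run-based (groupby-style) scan over
-- maximal same-predicate runs; equivalence of the two is proved (idiomatic decomposition, same cost).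


-- word.capitalize() for both ports: first char upper-cased, the rest lower-cased (exact on ASCII)
def pvCap : List Char → List Char
  | [] => []
  | c :: t => PySem.Chars.upperChar c :: PySem.Chars.lower t

-- ===== PORT A =====
-- fold over the characters with state (result, word); flush the pending word at each non-alpha char and at the end
def dropCapGo (res : List Char) (word : List Char) : List Char → List Char
  | [] =>
    if word.isEmpty then res
    else if word.length > 2 then res ++ pvCap word
    else res ++ word
  | c :: cs =>
    if PySem.Chars.isalpha c then dropCapGo res (word ++ [c]) cs
    else if word.isEmpty then dropCapGo (res ++ [c]) [] cs
    else if word.length > 2 then dropCapGo (res ++ pvCap word ++ [c]) [] cs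
    else dropCapGo (res ++ word ++ [c]) [] cs

def drop_cap (words : String) : String := String.ofList (dropCapGo [] [] words.toList)

-- ===== PORT B =====
-- two-pointer run extraction: take the maximal run with the same isalpha value as the head,
-- transform it if alphabetic and longer than two, recurse on the rest
def dropCapChunks : List Char → List Char
  | [] => []
  | c :: cs =>
    let k := PySem.Chars.isalpha c
    let run := cs.takeWhile (fun d => PySem.Chars.isalpha d == k)
    let chunk := c :: run
    (if k && chunk.length > 2 then pvCap chunk else chunk)
      ++ dropCapChunks (cs.dropWhile (fun d => PySem.Chars.isalpha d == k))
  termination_by l => l.length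
  decreasing_by
    exact Nat.lt_succ_of_le (List.length_dropWhile_le _ _)

def drop_cap_alt (words : String) : String := String.ofList (dropCapChunks words.toList)

-- ===== PRECONDITION & SPEC =====
def Spec_drop_cap (words : String) (out : String) : Prop := out = drop_cap_alt words
instance (words : String) (out : String) : Decidable (Spec_drop_cap words out) := by unfold Spec_drop_cap; infer_instance

-- ===== CLAIM (what is proved, stated in full; the proofs are below) =====
def Claim_equal_drop_cap : Prop := ∀ (words : String), Dom_drop_cap words → Spec_drop_cap words (drop_cap words)

-- ===== LEMMAS AND PROOFS =====

-- A's end-of-word flush, as one function ([] flushes to [])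
def pvFlush (w : List Char) : List Char := if w.length > 2 then pvCap w else w

theorem pvFlush_nil : pvFlush [] = [] := rfl

-- a non-alpha head passes through B unchanged
theorem chunks_cons_nonalpha (c : Char) (cs : List Char)
    (hc : PySem.Chars.isalpha c = false) :
    dropCapChunks (c :: cs) = c :: dropCapChunks cs := by
  cases cs with
  | nil => simp [dropCapChunks, hc]
  | cons d t =>
    by_cases hd : PySem.Chars.isalpha d
    · simp [dropCapChunks, hc, hd]
    · simp only [Bool.not_eq_true] at hd
      rw [dropCapChunks, dropCapChunks]
      simp [hc, hd]

-- B equals: flush the leading alpha run, then B on the rest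
theorem chunks_flush (cs : List Char) :
    dropCapChunks cs
      = pvFlush (cs.takeWhile PySem.Chars.isalpha)
        ++ dropCapChunks (cs.dropWhile PySem.Chars.isalpha) := by
  cases cs with
  | nil => simp [dropCapChunks, pvFlush_nil]
  | cons c t =>
    by_cases hc : PySem.Chars.isalpha c
    · rw [dropCapChunks]
      simp only [hc, Bool.true_and, List.takeWhile_cons, List.dropWhile_cons]
      simp [pvFlush]
    · simp only [Bool.not_eq_true] at hc
      simp [hc, pvFlush_nil]

-- the loop of A computes: emitted prefix, then the flush of (pending word ++ leading alpha run), then B on the rest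
theorem go_eq (cs : List Char) : ∀ (word res : List Char),
    dropCapGo res word cs
      = res ++ pvFlush (word ++ cs.takeWhile PySem.Chars.isalpha)
        ++ dropCapChunks (cs.dropWhile PySem.Chars.isalpha) := by
  induction cs with
  | nil =>
    intro word res
    rcases word with _ | ⟨c, t⟩
    · simp [dropCapGo, dropCapChunks, pvFlush_nil]
    · simp only [dropCapGo, List.isEmpty_cons, List.takeWhile_nil, List.dropWhile_nil,
        List.append_nil, dropCapChunks, pvFlush]
      split_ifs <;> simp_all
  | cons c cs ih =>
    intro word res
    by_cases hc : PySem.Chars.isalpha c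
    · simp only [dropCapGo, if_true, ih, List.takeWhile_cons, List.dropWhile_cons, hc]
      simp
    · simp only [Bool.not_eq_true] at hc
      have hstep : dropCapGo res word (c :: cs) = dropCapGo (res ++ pvFlush word ++ [c]) [] cs := by
        rcases word with _ | ⟨w, t⟩
        · simp [dropCapGo, hc, pvFlush_nil]
        · simp only [dropCapGo, hc, Bool.false_eq_true, if_false, List.isEmpty_cons, pvFlush]
          split_ifs <;> simp_all
      rw [hstep, ih]
      simp only [List.takeWhile_cons, List.dropWhile_cons, hc, Bool.false_eq_true, if_false]
      rw [chunks_cons_nonalpha c cs hc, chunks_flush cs]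
      simp [pvFlush_nil]

-- ===== VERDICT (by name: the statement is the Claim_ definition above) =====
theorem drop_cap_spec : Claim_equal_drop_cap := by
  intro words _
  unfold Spec_drop_cap drop_cap drop_cap_alt
  rw [go_eq, chunks_flush words.toList]
  simp
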